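-- pv_equiv track=rewrite | github.com/rftafas/hdltools | hdltools/regbank_gen.py | byte_enable_vector
-- ===== SOURCE A (Python) =====
-- import math
--
-- def byte_enable_vector(start,end,size):
--     vector = "\""
--     tmp1 = math.floor(start/8)
--     tmp2 = math.floor(end/8)
--     j = math.ceil(size/8)-1
--     while j >= 0:
--         if (j < tmp1 or j > tmp2):
--             vector += "0"
--         else:
--             vector += "1"
--         j -= 1
--     vector += "\""
--     return vector
-- ===== SOURCE B (Python) =====
-- def byte_enable_vector(start, end, size):
--     # closed form: clamp the byte range into [0, n) and emit three runs
--     n = -((-size) // 8)               # ceil(size/8)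
--     a = min(max(start // 8, 0), n)    # trailing zeros (LSB side)
--     b = min(max(end // 8 + 1, 0), n)  # one past the last enabled byte
--     ones = max(b - a, 0)
--     return '"' + '0' * (n - a - ones) + '1' * ones + '0' * a + '"'
-- ===== Notes on version B (the rewrite author's own statement) =====
-- stated objective: faster
-- what changed: Replaced the per-byte MSB-first while loop with a closed-form computation of the three run lengths (leading zeros, ones, trailing zeros) built by string repetition.
import Mathlib
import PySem

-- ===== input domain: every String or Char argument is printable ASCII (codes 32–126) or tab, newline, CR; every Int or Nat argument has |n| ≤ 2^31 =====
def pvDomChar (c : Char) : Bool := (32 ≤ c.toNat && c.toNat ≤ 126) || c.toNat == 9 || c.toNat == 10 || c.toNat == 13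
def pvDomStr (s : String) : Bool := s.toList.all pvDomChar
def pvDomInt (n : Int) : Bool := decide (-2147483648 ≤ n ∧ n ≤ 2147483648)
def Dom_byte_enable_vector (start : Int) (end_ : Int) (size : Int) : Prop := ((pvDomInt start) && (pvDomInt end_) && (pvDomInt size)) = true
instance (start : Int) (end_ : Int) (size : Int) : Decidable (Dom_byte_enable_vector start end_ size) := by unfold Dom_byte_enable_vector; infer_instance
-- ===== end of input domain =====

-- B replaces A's per-byte MSB-first while loop by a closed form: the three run
-- lengths (leading zeros, ones, trailing zeros) are computed arithmetically and
-- the string is built by repetition.  Return values agree on all integer inputs.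

-- ===== PORT A =====
-- A's while loop, counting j from ceil(size/8)-1 down to 0; fuel = j+1 iterations.
-- math.floor(start/8) = floordiv start 8 and math.ceil(size/8) = -((-size)//8):
-- exact on the domain (|n| ≤ 2^31, far below float precision loss).
def beLoopA (tmp1 tmp2 : Int) : Nat → String → String
  | 0, vector => vector
  | Nat.succ k, vector =>
      beLoopA tmp1 tmp2 k
        (vector ++ (if (k : Int) < tmp1 ∨ (k : Int) > tmp2 then "0" else "1"))

def byte_enable_vector (start : Int) (end_ : Int) (size : Int) : String :=
  let vector := "\""
  let tmp1 := PySem.Int.floordiv start 8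
  let tmp2 := PySem.Int.floordiv end_ 8
  let j := -(PySem.Int.floordiv (-size) 8) - 1
  (beLoopA tmp1 tmp2 (j + 1).toNat vector) ++ "\""

-- ===== PORT B =====
def byte_enable_vector_alt (start : Int) (end_ : Int) (size : Int) : String :=
  let n := -(PySem.Int.floordiv (-size) 8)
  let a := min (max (PySem.Int.floordiv start 8) 0) n
  let b := min (max (PySem.Int.floordiv end_ 8 + 1) 0) n
  let ones := max (b - a) 0
  "\"" ++ String.ofList (List.replicate (n - a - ones).toNat '0')
       ++ String.ofList (List.replicate ones.toNat '1')
       ++ String.ofList (List.replicate a.toNat '0') ++ "\""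

-- ===== PRECONDITION & SPEC =====
def Spec_byte_enable_vector (start : Int) (end_ : Int) (size : Int) (out : String) : Prop := out = byte_enable_vector_alt start end_ size
instance (start : Int) (end_ : Int) (size : Int) (out : String) : Decidable (Spec_byte_enable_vector start end_ size out) := by unfold Spec_byte_enable_vector; infer_instance

-- ===== CLAIM (what is proved, stated in full; the proofs are below) =====
def Claim_equal_byte_enable_vector : Prop := ∀ (start : Int) (end_ : Int) (size : Int), Dom_byte_enable_vector start end_ size → Spec_byte_enable_vector start end_ size (byte_enable_vector start end_ size)

-- ===== LEMMAS AND PROOFS =====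

-- the character A's loop writes for byte index k
def beChar (tmp1 tmp2 : Int) (k : Nat) : Char :=
  if (k : Int) < tmp1 ∨ (k : Int) > tmp2 then '0' else '1'

theorem ofList_cons_eq (c : Char) (l : List Char) :
    String.ofList (c :: l) = String.ofList [c] ++ String.ofList l := by
  rw [← List.singleton_append, String.ofList_append]

theorem beLoopA_eq (tmp1 tmp2 : Int) :
    ∀ (m : Nat) (acc : String),
      beLoopA tmp1 tmp2 m acc =
        acc ++ String.ofList ((List.range m).reverse.map (beChar tmp1 tmp2)) := by
  intro m
  induction m with
  | zero => intro acc; simp [beLoopA]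
  | succ k ih =>
      intro acc
      rw [beLoopA, ih]
      rw [List.range_succ, List.reverse_append]
      simp only [List.reverse_singleton, List.singleton_append, List.map_cons]
      rw [ofList_cons_eq, ← String.append_assoc]
      by_cases h : (k : Int) < tmp1 ∨ (k : Int) > tmp2 <;>
        simp only [beChar, h, if_true, if_false]

theorem run_decomp (tmp1 tmp2 n : Int) (hn : 0 ≤ n) :
    (List.range n.toNat).reverse.map (beChar tmp1 tmp2) =
      let a := min (max tmp1 0) n
      let b := min (max (tmp2 + 1) 0) n
      let ones := max (b - a) 0
      List.replicate (n - a - ones).toNat '0'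
        ++ List.replicate ones.toNat '1' ++ List.replicate a.toNat '0' := by
  simp only
  set a := min (max tmp1 0) n with ha
  set b := min (max (tmp2 + 1) 0) n with hb
  set ones := max (b - a) 0 with hones
  rw [List.append_assoc]
  apply List.ext_getElem
  · simp only [List.length_map, List.length_reverse, List.length_range,
      List.length_append, List.length_replicate]
    omega
  · intro i h1 h2
    simp only [List.length_map, List.length_reverse, List.length_range,
      List.length_append, List.length_replicate] at h1 h2
    rw [List.getElem_map, List.getElem_reverse, List.getElem_range]
    simp only [List.length_range]
    by_cases hc1 : i < (List.replicate (n - a - ones).toNat '0').length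
    · rw [List.getElem_append_left hc1, List.getElem_replicate]
      simp only [List.length_replicate] at hc1
      simp only [beChar]
      rw [if_pos (by omega)]
    · rw [List.getElem_append_right (Nat.le_of_not_lt hc1)]
      simp only [List.length_replicate] at hc1 ⊢
      by_cases hc2 : i - (n - a - ones).toNat < (List.replicate ones.toNat '1').length
      · rw [List.getElem_append_left hc2, List.getElem_replicate]
        simp only [List.length_replicate] at hc2
        simp only [beChar]
        rw [if_neg (by omega)]
      · rw [List.getElem_append_right (Nat.le_of_not_lt hc2), List.getElem_replicate]
        simp only [List.length_replicate] at hc2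
        simp only [beChar]
        rw [if_pos (by omega)]

-- ===== VERDICT (by name: the statement is the Claim_ definition above) =====
theorem byte_enable_vector_spec : Claim_equal_byte_enable_vector := by
  intro start end_ size _
  unfold Spec_byte_enable_vector byte_enable_vector byte_enable_vector_alt
  simp only
  set tmp1 := PySem.Int.floordiv start 8 with h1
  set tmp2 := PySem.Int.floordiv end_ 8 with h2
  set n := -(PySem.Int.floordiv (-size) 8) with hn
  rw [beLoopA_eq]
  rcases le_or_gt 0 n with hpos | hneg
  · have hfuel : (n - 1 + 1).toNat = n.toNat := by omega
    rw [hfuel, run_decomp tmp1 tmp2 n hpos]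
    simp only [String.ofList_append, String.append_assoc]
  · have hz : ∀ m : Int, m ≤ 0 → m.toNat = 0 := by omega
    have hfuel : (n - 1 + 1).toNat = 0 := by omega
    rw [hfuel,
        hz _ (by omega : n - min (max tmp1 0) n - max (min (max (tmp2 + 1) 0) n - min (max tmp1 0) n) 0 ≤ 0),
        hz _ (by omega : max (min (max (tmp2 + 1) 0) n - min (max tmp1 0) n) 0 ≤ 0),
        hz _ (by omega : min (max tmp1 0) n ≤ 0)]
    simp [String.ofList_nil]
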